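-- pv_equiv track=rewrite | github.com/andrebellotti/ansible-aws | plugins/module_utils/ec2_key_pair_utils.py | _fingerprint_check
-- ===== SOURCE A (Python) =====
-- def _fingerprint_check(fp, fp_bits):
--     """
--     :type fp: str
--     :type fp_bits: int
--     :rtype: bool
--     """
--     # fingerprint to hex (2^4 = 16 bits per char)
--     # + colons every two characters (without the final one)
--     fp_length_full = int(fp_bits / 4 + (fp_bits / (4 * 2) - 1))
--     # 16 bits per char, two chars per part
--     fp_part_count = int(fp_bits / (4 * 2))
--
--     split = fp.split(":")
--     length_check = len(fp) == fp_length_full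
--     split_length_check = len(split) == fp_part_count
--     split_parts_check = all(len(s) == 2 for s in split)
--     split_contents_check = all(all(c.isalnum() for c in part) for part in split)
--     return length_check and split_length_check and split_parts_check and split_contents_check
-- ===== SOURCE B (Python) =====
-- def _fingerprint_check(fp, fp_bits):
--     """
--     :type fp: str
--     :type fp_bits: int
--     :rtype: bool
--     """
--     fp_length_full = int(fp_bits / 4 + (fp_bits / (4 * 2) - 1))
--     fp_part_count = int(fp_bits / (4 * 2))
--     # a valid layout (fp_part_count parts of 2 chars joined by ':') forces this relation
--     if fp_length_full != 3 * fp_part_count - 1: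
--         return False
--     if len(fp) != fp_length_full:
--         return False
--     # single positional walk instead of split(): colon exactly at i % 3 == 2, alnum elsewhere
--     for i in range(len(fp)):
--         if i % 3 == 2:
--             if fp[i] != ':':
--                 return False
--         elif not fp[i].isalnum():
--             return False
--     return True
-- ===== Notes on version B (the rewrite author's own statement) =====
-- stated objective: faster
-- what changed: B keeps A's length formulas but drops the split(":") pass entirely: after an O(1) length/shape check it validates the string in one early-exiting positional walk (colon required exactly at indices i % 3 == 2, alnum elsewhere) instead of building the list of parts and scanning it three times.
import Mathlib
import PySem

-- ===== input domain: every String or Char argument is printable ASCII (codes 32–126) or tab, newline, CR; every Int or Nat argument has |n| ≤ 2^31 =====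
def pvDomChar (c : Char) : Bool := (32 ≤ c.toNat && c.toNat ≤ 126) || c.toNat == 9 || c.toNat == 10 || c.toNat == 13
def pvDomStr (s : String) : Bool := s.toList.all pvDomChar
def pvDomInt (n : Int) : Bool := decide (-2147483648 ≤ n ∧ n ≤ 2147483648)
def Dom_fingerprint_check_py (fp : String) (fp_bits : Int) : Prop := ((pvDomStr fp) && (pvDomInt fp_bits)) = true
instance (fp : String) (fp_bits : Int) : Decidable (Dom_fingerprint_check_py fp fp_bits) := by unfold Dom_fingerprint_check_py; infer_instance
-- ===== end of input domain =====

-- B replaces A's split(":")-and-scan validation by one positional walk over the string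
-- (colon exactly at positions i % 3 == 2, alnum elsewhere) after a length/shape check: alternative decomposition.


-- ===== PORT A =====
-- int(fp_bits/4 + (fp_bits/(4*2) - 1)): for |fp_bits| ≤ 2^31 the float arithmetic is exact
-- (every intermediate is a dyadic rational with denominator 8 and magnitude < 2^53), the value
-- inside int() is exactly (3*fp_bits - 8)/8, and int() truncates toward zero = Int.tdiv.
-- Same reasoning for int(fp_bits/(4*2)) = Int.tdiv fp_bits 8.
def fingerprint_check_py (fp : String) (fp_bits : Int) : Bool :=
  let fp_length_full : Int := Int.tdiv (3 * fp_bits - 8) 8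
  let fp_part_count : Int := Int.tdiv fp_bits 8
  let split := PySem.Chars.splitOn fp.toList ":".toList   -- fp.split(":"), sep ≠ ""
  let length_check := ((PySem.Str.len fp : Int) == fp_length_full)
  let split_length_check := ((split.length : Int) == fp_part_count)
  let split_parts_check := split.all (fun s => s.length == 2)
  let split_contents_check := split.all (fun part => part.all (fun c => PySem.Chars.isalnum c))
  length_check && split_length_check && split_parts_check && split_contents_check

-- ===== PORT B =====
-- the positional loop of Source B: early-return-False becomes &&-recursion over the chars with index i
def chkB : Nat → List Char → Bool
  | _, [] => true
  | i, c :: rest => (if i % 3 == 2 then c == ':' else PySem.Chars.isalnum c) && chkB (i + 1) rest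

def fingerprint_check_py_alt (fp : String) (fp_bits : Int) : Bool :=
  let fp_length_full : Int := Int.tdiv (3 * fp_bits - 8) 8
  let fp_part_count : Int := Int.tdiv fp_bits 8
  if fp_length_full != 3 * fp_part_count - 1 then false
  else if (PySem.Str.len fp : Int) != fp_length_full then false
  else chkB 0 fp.toList

-- ===== PRECONDITION & SPEC =====
def Spec_fingerprint_check_py (fp : String) (fp_bits : Int) (out : Bool) : Prop := out = fingerprint_check_py_alt fp fp_bits
instance (fp : String) (fp_bits : Int) (out : Bool) : Decidable (Spec_fingerprint_check_py fp fp_bits out) := by unfold Spec_fingerprint_check_py; infer_instance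

-- ===== CLAIM (what is proved, stated in full; the proofs are below) =====
def Claim_equal_fingerprint_check_py : Prop := ∀ (fp : String) (fp_bits : Int), Dom_fingerprint_check_py fp fp_bits → Spec_fingerprint_check_py fp fp_bits (fingerprint_check_py fp fp_bits)

-- ===== LEMMAS AND PROOFS =====

-- reference splitter: Python's s.split(":") as plain structural recursion (cur = current part)
def mySplit : List Char → List Char → List (List Char)
  | cur, [] => [cur]
  | cur, c :: rest => if c = ':' then cur :: mySplit [] rest else mySplit (cur ++ [c]) rest

theorem splitOn_go_spec (fuel : Nat) : ∀ (l cur : List Char) (acc : List (List Char)),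
    l.length < fuel →
    PySem.Chars.splitOn.go [':'] fuel l cur acc = acc.reverse ++ mySplit cur.reverse l := by
  induction fuel with
  | zero => intro l cur acc h; omega
  | succ n ih =>
    intro l cur acc h
    cases l with
    | nil => simp [PySem.Chars.splitOn.go, mySplit]
    | cons c rest =>
      rw [PySem.Chars.splitOn.go]
      by_cases hc : c = ':'
      · subst hc
        have hp : List.isPrefixOf [':'] (':' :: rest) = true := by simp [List.isPrefixOf]
        simp only [hp, if_pos]
        rw [ih]
        · simp [mySplit]
        · simpa using Nat.lt_of_succ_lt_succ h
      · have hp : List.isPrefixOf [':'] (c :: rest) = false := by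
          simp [List.isPrefixOf]; exact fun hh => (hc hh.symm).elim
        simp only [hp]
        rw [if_neg (by simp)]
        rw [ih]
        · simp [mySplit, hc]
        · simpa using Nat.lt_of_succ_lt_succ h

theorem splitOn_eq_mySplit (s : List Char) :
    PySem.Chars.splitOn s ":".toList = mySplit [] s := by
  have h : (":".toList) = [':'] := rfl
  rw [h, PySem.Chars.splitOn, splitOn_go_spec (s.length + 1) s [] [] (by omega)]
  simp

-- every result of mySplit cur s starts with a part extending cur
theorem mySplit_head (s : List Char) : ∀ cur, ∃ t tl, mySplit cur s = (cur ++ t) :: tl := by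
  induction s with
  | nil => intro cur; exact ⟨[], [], by simp [mySplit]⟩
  | cons c rest ih =>
    intro cur
    by_cases hc : c = ':'
    · exact ⟨[], mySplit [] rest, by simp [mySplit, hc]⟩
    · obtain ⟨t, tl, ht⟩ := ih (cur ++ [c])
      exact ⟨c :: t, tl, by simp [mySplit, hc, ht]⟩

-- total char count: parts plus the separators between them
theorem mySplit_sumlen (s : List Char) : ∀ cur,
    ((mySplit cur s).map List.length).sum + (mySplit cur s).length = cur.length + s.length + 1 := by
  induction s with
  | nil => intro cur; simp [mySplit]
  | cons c rest ih =>
    intro cur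
    by_cases hc : c = ':'
    · have := ih []
      simp only [mySplit, hc, if_true, List.map_cons, List.sum_cons, List.length_cons]
      simp at this; omega
    · simp only [mySplit, if_neg hc]
      have := ih (cur ++ [c])
      simp at this ⊢; omega

-- chunk-of-three shape of a valid fingerprint
def ok3 : List Char → Bool
  | [a, b] => PySem.Chars.isalnum a && PySem.Chars.isalnum b
  | a :: b :: c :: rest => PySem.Chars.isalnum a && PySem.Chars.isalnum b && (c == ':') && ok3 rest
  | _ => false

theorem chkB_shift (s : List Char) : ∀ i, chkB (i + 3) s = chkB i s := by
  induction s with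
  | nil => intro i; rfl
  | cons c rest ih =>
    intro i
    have h3 : (i + 3) % 3 = i % 3 := by omega
    simp only [chkB, h3]
    have h4 : i + 3 + 1 = (i + 1) + 3 := by omega
    rw [h4, ih]

theorem chkB_eq_ok3 (s : List Char) (h : s.length % 3 = 2) : chkB 0 s = ok3 s := by
  induction s using ok3.induct with
  | case1 a b => simp [chkB, ok3]
  | case2 a b c rest ih =>
    have hr : rest.length % 3 = 2 := by simp at h; omega
    show chkB 0 (a :: b :: c :: rest) = _
    simp only [chkB, ok3]
    rw [show (2 : Nat) + 1 = 0 + 3 from rfl, chkB_shift, ih hr]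
    norm_num [Bool.and_assoc]
  | case3 s h1 h2 =>
    exfalso
    match s, h1, h2 with
    | [], _, _ => simp at h
    | [a], _, _ => simp at h
    | [a,b], h1, _ => exact h1 a b rfl
    | a::b::c::r, _, h2 => exact h2 a b c r rfl

-- A's three split-based checks bundled, with the count check in its Nat form
def aside (s : List Char) : Bool :=
  (3 * (mySplit [] s).length == s.length + 1) &&
  (mySplit [] s).all (fun p => p.length == 2) &&
  (mySplit [] s).all (fun p => p.all (fun c => PySem.Chars.isalnum c))

theorem isalnum_colon : PySem.Chars.isalnum ':' = false := by decide

theorem aside_eq_ok3 (s : List Char) (h : s.length % 3 = 2) : aside s = ok3 s := by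
  induction s using ok3.induct with
  | case1 a b =>
    by_cases ha : a = ':'
    · subst ha; simp [aside, mySplit, ok3, isalnum_colon]
    · by_cases hb : b = ':'
      · subst hb; simp [aside, mySplit, ok3, ha, isalnum_colon]
      · simp [aside, mySplit, ok3, ha, hb]
  | case2 a b c rest ih =>
    have hr : rest.length % 3 = 2 := by simp at h; omega
    by_cases ha : a = ':'
    · subst ha
      have hsp : mySplit [] (':' :: b :: c :: rest) = [] :: mySplit [] (b :: c :: rest) := by
        simp [mySplit]
      simp [aside, hsp, ok3, isalnum_colon]
    · by_cases hb : b = ':'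
      · subst hb
        have hsp : mySplit [] (a :: ':' :: c :: rest) = [a] :: mySplit [] (c :: rest) := by
          simp [mySplit, ha]
        simp [aside, hsp, ok3, isalnum_colon]
      · by_cases hc : c = ':'
        · subst hc
          have hsp : mySplit [] (a :: b :: ':' :: rest) = [a, b] :: mySplit [] rest := by
            simp [mySplit, ha, hb]
          have hcnt : ∀ n r : Nat, (3 * (n + 1) == r + 3 + 1) = (3 * n == r + 1) := by
            intro n r
            by_cases h : 3 * n = r + 1
            · have h2 : 3 * (n + 1) = r + 3 + 1 := by omega
              simp [h, h2]
            · have h2 : ¬ (3 * (n + 1) = r + 3 + 1) := by omega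
              simp [h, h2]
          simp only [aside, hsp, List.length_cons, List.all_cons, List.length_nil, ok3,
            beq_self_eq_true, Bool.true_and]
          rw [← ih hr]
          simp only [aside]
          have hq := hcnt (mySplit [] rest).length rest.length
          cases hA : PySem.Chars.isalnum a <;> cases hB : PySem.Chars.isalnum b <;>
            simp [hq, Bool.and_comm, Bool.and_left_comm]
        · obtain ⟨t, tl, ht⟩ := mySplit_head rest ([a, b, c])
          have hsp : mySplit [] (a :: b :: c :: rest) = (a :: b :: c :: t) :: tl := by
            simp [mySplit, ha, hb, hc]; simpa using ht
          simp [aside, hsp, ok3, hc]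
  | case3 s h1 h2 =>
    exfalso
    match s, h1, h2 with
    | [], _, _ => simp at h
    | [a], _, _ => simp at h
    | [a,b], h1, _ => exact h1 a b rfl
    | a::b::c::r, _, h2 => exact h2 a b c r rfl

theorem sum_map_len2 (l : List (List Char)) (h : ∀ p ∈ l, p.length = 2) :
    (l.map List.length).sum = 2 * l.length := by
  induction l with
  | nil => simp
  | cons p rest ih =>
    simp [h p (by simp), ih (fun q hq => h q (by simp [hq]))]; omega

theorem main_eq (fp : String) (fp_bits : Int) :
    fingerprint_check_py fp fp_bits = fingerprint_check_py_alt fp fp_bits := by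
  simp only [fingerprint_check_py, fingerprint_check_py_alt, splitOn_eq_mySplit,
    PySem.Str.len_eq, String.length_toList]
  set s := fp.toList with hs
  set L := Int.tdiv (3 * fp_bits - 8) 8 with hL
  set pc := Int.tdiv fp_bits 8 with hpc
  have hsl : s.length = fp.length := by rw [hs, String.length_toList]
  by_cases h1 : L = 3 * pc - 1
  · rw [if_neg (by simp [h1])]
    by_cases h2 : (fp.length : Int) = L
    · rw [if_neg (by simp [h2])]
      have h3 : (fp.length : Int) = 3 * pc - 1 := by rw [h2, h1]
      have hmod : s.length % 3 = 2 := by rw [hsl]; omega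
      have e1 : ((fp.length : Int) == L) = true := by simp [h2]
      have e2 : (((mySplit [] s).length : Int) == pc) = (3 * (mySplit [] s).length == s.length + 1) := by
        have h4 : (s.length : Int) + 1 = 3 * pc := by rw [hsl]; omega
        by_cases hq : ((mySplit [] s).length : Int) = pc
        · have hq2 : 3 * (mySplit [] s).length = s.length + 1 := by omega
          simp [hq, hq2]
        · have hq2 : ¬ (3 * (mySplit [] s).length = s.length + 1) := by omega
          simp [hq, hq2]
      rw [e1, e2, chkB_eq_ok3 s hmod, ← aside_eq_ok3 s hmod]
      simp [aside, Bool.and_assoc]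
    · rw [if_pos (by simp [h2])]
      rw [show ((fp.length : Int) == L) = false from by simp [h2]]
      simp
  · rw [if_pos (by simp [h1])]
    rw [Bool.eq_false_iff]
    intro hA
    simp only [Bool.and_eq_true, beq_iff_eq, List.all_eq_true] at hA
    obtain ⟨⟨⟨hg1, hg2⟩, hg3⟩, hg4⟩ := hA
    have hsum := mySplit_sumlen s []
    have h2l := sum_map_len2 (mySplit [] s) (fun p hp => by simpa using hg3 p hp)
    simp only [List.length_nil] at hsum
    clear hL hpc hs
    clear_value s L pc
    omega

-- ===== VERDICT (by name: the statement is the Claim_ definition above) =====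
theorem fingerprint_check_py_spec : Claim_equal_fingerprint_check_py := by
  intro fp fp_bits _
  exact main_eq fp fp_bits
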